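-- pv_equiv track=rewrite | github.com/RescueDiver/arcs4 | vision/global_pattern_reader.py | find_uniform_rectangles
-- ===== SOURCE A (Python) =====
-- def grid_h(grid):
--     return len(grid)
--
-- def grid_w(grid):
--     return len(grid[0]) if grid else 0
--
-- def find_uniform_rectangles(grid, min_h=2, min_w=2, max_h=8, max_w=8):
--     h = grid_h(grid)
--     w = grid_w(grid)
--     rects = []
--
--     for top in range(h):
--         for left in range(w):
--             color = grid[top][left]
--
--             for rh in range(min_h, min(max_h, h - top) + 1):
--                 for rw in range(min_w, min(max_w, w - left) + 1):
--                     ok = True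
--                     for r in range(top, top + rh):
--                         for c in range(left, left + rw):
--                             if grid[r][c] != color:
--                                 ok = False
--                                 break
--                         if not ok:
--                             break
--
--                     if ok:
--                         rects.append({
--                             "top": top,
--                             "left": left,
--                             "bottom": top + rh - 1,
--                             "right": left + rw - 1,
--                             "height": rh,
--                             "width": rw,
--                             "color": color,
--                             "area": rh * rw,
--                         })
--
--     return rects
-- ===== SOURCE B (Python) =====
-- def find_uniform_rectangles(grid, min_h=2, min_w=2, max_h=8, max_w=8):
--     h = len(grid)
--     w = len(grid[0]) if grid else 0
--     rects = []
--     for top in range(h):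
--         for left in range(w):
--             color = grid[top][left]
--             hi_h = min(max_h, h - top)
--             hi_w = min(max_w, w - left)
--             # cap = widest uniform width over the rows folded in so far;
--             # rows are folded in lazily, only when a height in range needs them
--             cap = hi_w
--             rows_done = 0
--             for rh in range(min_h, hi_h + 1):
--                 while rows_done < rh:
--                     row = grid[top + rows_done]
--                     e = 0
--                     while e < hi_w and row[left + e] == color:
--                         e += 1
--                     cap = min(cap, e)
--                     rows_done += 1
--                 for rw in range(min_w, cap + 1):
--                     rects.append({
--                         "top": top,
--                         "left": left,
--                         "bottom": top + rh - 1,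
--                         "right": left + rw - 1,
--                         "height": rh,
--                         "width": rw,
--                         "color": color,
--                         "area": rh * rw,
--                     })
--     return rects
-- ===== Notes on version B (the rewrite author's own statement) =====
-- stated objective: alternative
-- what changed: Instead of rescanning every candidate rectangle cell by cell for each (height,width) pair, B computes per anchor the uniform run width of each row once (lazily, as heights demand them), folds them into a running minimum cap, and emits all admissible widths for each height directly with no per-rectangle test.
import Mathlib
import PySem

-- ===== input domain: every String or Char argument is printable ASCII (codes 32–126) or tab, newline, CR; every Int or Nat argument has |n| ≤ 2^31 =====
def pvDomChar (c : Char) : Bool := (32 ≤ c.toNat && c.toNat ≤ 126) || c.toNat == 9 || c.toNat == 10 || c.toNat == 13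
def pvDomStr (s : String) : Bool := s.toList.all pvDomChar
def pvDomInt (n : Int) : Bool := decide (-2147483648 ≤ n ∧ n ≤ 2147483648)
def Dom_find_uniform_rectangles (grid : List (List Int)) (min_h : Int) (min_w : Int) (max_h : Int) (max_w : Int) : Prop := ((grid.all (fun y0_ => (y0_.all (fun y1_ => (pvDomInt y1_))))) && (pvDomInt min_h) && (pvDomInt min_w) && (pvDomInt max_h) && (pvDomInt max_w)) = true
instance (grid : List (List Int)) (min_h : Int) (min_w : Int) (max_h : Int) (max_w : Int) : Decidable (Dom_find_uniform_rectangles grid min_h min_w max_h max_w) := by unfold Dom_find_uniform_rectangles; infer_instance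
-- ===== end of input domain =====

-- B replaces A's per-rectangle cell rescan by per-anchor row run widths folded lazily into a
-- running minimum, emitting admissible widths directly (alternative algorithm; equal return value on Pre_).

-- ===== PORT A =====
-- the dict literal appended by both programs, as an insertion-ordered association list
def pvMkRect (top left rh rw color : Int) : List (String × Int) :=
  [("top", top), ("left", left), ("bottom", top + rh - 1), ("right", left + rw - 1),
   ("height", rh), ("width", rw), ("color", color), ("area", rh * rw)]

-- grid[r][c]; Pre_ keeps every access in range, where pyGetD is exactly Python's indexing
def pvCell (grid : List (List Int)) (r c : Int) : Int :=
  PySem.List.pyGetD (PySem.List.pyGetD grid r []) c 0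

-- the two scanning loops with break: stop at the first mismatching cell = List.all
def pvOkRect (grid : List (List Int)) (color top left rh rw : Int) : Bool :=
  (PySem.List.pyRange top (top + rh) 1).all (fun r =>
    (PySem.List.pyRange left (left + rw) 1).all (fun c => pvCell grid r c == color))

def find_uniform_rectangles (grid : List (List Int)) (min_h : Int) (min_w : Int) (max_h : Int) (max_w : Int) : List (List (String × Int)) :=
  let h : Int := grid.length
  let w : Int := if grid.isEmpty then 0 else ((grid.headD []).length : Int)
  (PySem.List.pyRange 0 h 1).foldl (fun rects top =>
    (PySem.List.pyRange 0 w 1).foldl (fun rects left =>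
      let color := pvCell grid top left
      (PySem.List.pyRange min_h (min max_h (h - top) + 1) 1).foldl (fun rects rh =>
        (PySem.List.pyRange min_w (min max_w (w - left) + 1) 1).foldl (fun rects rw =>
          if pvOkRect grid color top left rh rw then rects ++ [pvMkRect top left rh rw color]
          else rects) rects) rects) rects) []

-- ===== PORT B =====
-- 'while e < hi and row[left + e] == color: e += 1'
def pvRunLenGo (row : List Int) (left hi color e : Int) : Int :=
  if h : e < hi ∧ PySem.List.pyGetD row (left + e) 0 == color then
    pvRunLenGo row left hi color (e + 1)
  else e
termination_by (hi - e).toNat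
decreasing_by omega

def pvRunLen (row : List Int) (left hi color : Int) : Int := pvRunLenGo row left hi color 0

-- 'while rows_done < rh: row = grid[top + rows_done]; e = …; cap = min(cap, e); rows_done += 1'
def pvAdvance (grid : List (List Int)) (top left hi_w color cap rows_done rh : Int) : Int × Int :=
  if h : rows_done < rh then
    let row := PySem.List.pyGetD grid (top + rows_done) []
    let e := pvRunLen row left hi_w color
    pvAdvance grid top left hi_w color (min cap e) (rows_done + 1) rh
  else (cap, rows_done)
termination_by (rh - rows_done).toNat
decreasing_by omega

def find_uniform_rectangles_alt (grid : List (List Int)) (min_h : Int) (min_w : Int) (max_h : Int) (max_w : Int) : List (List (String × Int)) :=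
  let h : Int := grid.length
  let w : Int := if grid.isEmpty then 0 else ((grid.headD []).length : Int)
  (PySem.List.pyRange 0 h 1).foldl (fun rects top =>
    (PySem.List.pyRange 0 w 1).foldl (fun rects left =>
      let color := PySem.List.pyGetD (PySem.List.pyGetD grid top []) left 0
      let hi_h := min max_h (h - top)
      let hi_w := min max_w (w - left)
      -- the rh loop carries (rects, cap, rows_done); st.2.1 = cap, st.2.2 = rows_done
      ((PySem.List.pyRange min_h (hi_h + 1) 1).foldl
        (fun (st : List (List (String × Int)) × Int × Int) rh =>
          let p := pvAdvance grid top left hi_w color st.2.1 st.2.2 rh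
          ((PySem.List.pyRange min_w (p.1 + 1) 1).foldl
              (fun rects rw => rects ++ [pvMkRect top left rh rw color]) st.1, p.1, p.2))
        (rects, hi_w, 0)).1) rects) []

-- ===== PRECONDITION & SPEC =====
-- Pre_ excludes exactly the grids in which some row is shorter than row 0: there Python A
-- (and Python B) raise IndexError while indexing grid[top][left] / grid[r][c].
def Pre_find_uniform_rectangles (grid : List (List Int)) (min_h : Int) (min_w : Int) (max_h : Int) (max_w : Int) : Prop :=
  ∀ row ∈ grid, (grid.headD []).length ≤ row.length
instance (grid : List (List Int)) (min_h : Int) (min_w : Int) (max_h : Int) (max_w : Int) : Decidable (Pre_find_uniform_rectangles grid min_h min_w max_h max_w) := by unfold Pre_find_uniform_rectangles; infer_instance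

def pvWitness_find_uniform_rectangles : List (List Int) × Int × Int × Int × Int := ([[1, 1], [1, 2]], 2, 2, 8, 8)

def Spec_find_uniform_rectangles (grid : List (List Int)) (min_h : Int) (min_w : Int) (max_h : Int) (max_w : Int) (out : List (List (String × Int))) : Prop := out = find_uniform_rectangles_alt grid min_h min_w max_h max_w
instance (grid : List (List Int)) (min_h : Int) (min_w : Int) (max_h : Int) (max_w : Int) (out : List (List (String × Int))) : Decidable (Spec_find_uniform_rectangles grid min_h min_w max_h max_w out) := by unfold Spec_find_uniform_rectangles; infer_instance

-- ===== CLAIM (what is proved, stated in full; the proofs are below) =====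
def Claim_equal_find_uniform_rectangles : Prop := ∀ (grid : List (List Int)) (min_h : Int) (min_w : Int) (max_h : Int) (max_w : Int), Dom_find_uniform_rectangles grid min_h min_w max_h max_w → Pre_find_uniform_rectangles grid min_h min_w max_h max_w → Spec_find_uniform_rectangles grid min_h min_w max_h max_w (find_uniform_rectangles grid min_h min_w max_h max_w)

-- ===== LEMMAS AND PROOFS =====

-- run width of the row grid[r] starting at column `left`, capped at hi
def pvEff (grid : List (List Int)) (left hi color r : Int) : Int :=
  pvRunLen (PySem.List.pyGetD grid r []) left hi color

-- prefix minimum of the run widths of rows top+k, …, top+k+n-1, seeded with cap0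
def pvPrefCap (grid : List (List Int)) (top left hi color cap0 k : Int) (n : Nat) : Int :=
  (List.range n).foldl (fun m (j : Nat) => min m (pvEff grid left hi color (top + k + (j : Int)))) cap0

theorem pvRunLenGo_ge (row : List Int) (left hi color e : Int) :
    e ≤ pvRunLenGo row left hi color e := by
  rw [pvRunLenGo]
  split
  · have := pvRunLenGo_ge row left hi color (e + 1); omega
  · omega
termination_by (hi - e).toNat
decreasing_by omega

theorem pvRunLenGo_matched (row : List Int) (left hi color e : Int) :
    ∀ j : Int, e ≤ j → j < pvRunLenGo row left hi color e →
      PySem.List.pyGetD row (left + j) 0 = color := by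
  intro j h1 h2
  rw [pvRunLenGo] at h2
  split at h2
  · next hc =>
    rcases eq_or_lt_of_le h1 with heq | hlt
    · subst heq; exact eq_of_beq hc.2
    · exact pvRunLenGo_matched row left hi color (e + 1) j (by omega) h2
  · omega
termination_by (hi - e).toNat
decreasing_by omega

theorem pvRunLenGo_stop (row : List Int) (left hi color e : Int)
    (h : pvRunLenGo row left hi color e < hi) :
    ¬ (PySem.List.pyGetD row (left + pvRunLenGo row left hi color e) 0 = color) := by
  by_cases hc : e < hi ∧ (PySem.List.pyGetD row (left + e) 0 == color) = true
  · have hrw : pvRunLenGo row left hi color e = pvRunLenGo row left hi color (e + 1) := by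
      conv_lhs => rw [pvRunLenGo]
      rw [dif_pos hc]
    rw [hrw] at h ⊢
    exact pvRunLenGo_stop row left hi color (e + 1) h
  · have hrw : pvRunLenGo row left hi color e = e := by
      conv_lhs => rw [pvRunLenGo]
      rw [dif_neg hc]
    rw [hrw] at h ⊢
    intro hm
    exact hc ⟨h, beq_iff_eq.mpr hm⟩
termination_by (hi - e).toNat
decreasing_by omega

theorem pvRunLen_char (row : List Int) (left hi color rw_ : Int) (hrw : rw_ ≤ hi) :
    rw_ ≤ pvRunLen row left hi color ↔
      ∀ j : Int, 0 ≤ j → j < rw_ → PySem.List.pyGetD row (left + j) 0 = color := by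
  constructor
  · intro hle j h0 hj
    exact pvRunLenGo_matched row left hi color 0 j h0 (by unfold pvRunLen at hle; omega)
  · intro hall
    by_contra hlt
    push_neg at hlt
    have h0 : (0 : Int) ≤ pvRunLen row left hi color := pvRunLenGo_ge row left hi color 0
    have hstop := pvRunLenGo_stop row left hi color 0 (by unfold pvRunLen at *; omega)
    exact hstop (hall _ h0 (by unfold pvRunLen at *; omega))

theorem pv_row_all_iff (grid : List (List Int)) (color r left hi rw_ : Int) (hrw : rw_ ≤ hi) :
    ((PySem.List.pyRange left (left + rw_) 1).all (fun c => pvCell grid r c == color) = true)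
      ↔ rw_ ≤ pvEff grid left hi color r := by
  rw [List.all_eq_true]
  rw [pvEff, pvRunLen_char _ _ _ _ _ hrw]
  constructor
  · intro hall j h0 hj
    have hc := hall (left + j) (by rw [PySem.List.mem_pyRange_one]; omega)
    simpa [pvCell] using hc
  · intro hm c hc
    rw [PySem.List.mem_pyRange_one] at hc
    have := hm (c - left) (by omega) (by omega)
    simp only [pvCell, beq_iff_eq]
    rw [show left + (c - left) = c by ring] at this
    exact this

theorem pvOkRect_iff (grid : List (List Int)) (color top left rh rw_ hi : Int) (hrw : rw_ ≤ hi) :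
    pvOkRect grid color top left rh rw_ = true ↔
      ∀ k : Int, 0 ≤ k → k < rh → rw_ ≤ pvEff grid left hi color (top + k) := by
  rw [pvOkRect, List.all_eq_true]
  constructor
  · intro hall k h0 hk
    have := hall (top + k) (by rw [PySem.List.mem_pyRange_one]; omega)
    exact (pv_row_all_iff grid color (top + k) left hi rw_ hrw).mp this
  · intro hm r hr
    rw [PySem.List.mem_pyRange_one] at hr
    rw [pv_row_all_iff grid color r left hi rw_ hrw]
    have := hm (r - top) (by omega) (by omega)
    rwa [show top + (r - top) = r by ring] at this

theorem le_pvPrefCap_iff (grid : List (List Int)) (top left hi color cap0 k : Int) (n : Nat) (x : Int) :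
    x ≤ pvPrefCap grid top left hi color cap0 k n ↔
      x ≤ cap0 ∧ ∀ j : Nat, j < n → x ≤ pvEff grid left hi color (top + k + j) := by
  induction n with
  | zero => simp [pvPrefCap]
  | succ n ih =>
    have hstep : pvPrefCap grid top left hi color cap0 k (n + 1)
        = min (pvPrefCap grid top left hi color cap0 k n) (pvEff grid left hi color (top + k + n)) := by
      simp [pvPrefCap, List.range_succ]
    rw [hstep, le_min_iff, ih]
    constructor
    · rintro ⟨⟨h1, h2⟩, h3⟩
      refine ⟨h1, fun j hj => ?_⟩
      rcases Nat.lt_succ_iff_lt_or_eq.mp hj with hlt | rfl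
      · exact h2 j hlt
      · exact h3
    · rintro ⟨h1, h2⟩
      exact ⟨⟨h1, fun j hj => h2 j (Nat.lt_succ_of_lt hj)⟩, h2 n (Nat.lt_succ_self n)⟩

theorem pvPrefCap_succ_right (grid : List (List Int)) (top left hi color cap0 k : Int) (n : Nat) :
    pvPrefCap grid top left hi color cap0 k (n + 1)
      = min (pvPrefCap grid top left hi color cap0 k n) (pvEff grid left hi color (top + k + n)) := by
  simp [pvPrefCap, List.range_succ]

theorem pvAdvance_spec (grid : List (List Int)) (top left hi_w color : Int) :
    ∀ (cap rows_done rh : Int), 0 ≤ rows_done →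
      cap = pvPrefCap grid top left hi_w color hi_w 0 rows_done.toNat →
      pvAdvance grid top left hi_w color cap rows_done rh
        = (pvPrefCap grid top left hi_w color hi_w 0 (max rh rows_done).toNat, max rh rows_done) := by
  intro cap rows_done rh h0 hcap
  rw [pvAdvance]
  split
  · next hlt =>
    have hcap' : min cap (pvRunLen (PySem.List.pyGetD grid (top + rows_done) []) left hi_w color)
        = pvPrefCap grid top left hi_w color hi_w 0 (rows_done + 1).toNat := by
      rw [hcap, show (rows_done + 1).toNat = rows_done.toNat + 1 by omega, pvPrefCap_succ_right]
      congr 1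
      show pvRunLen (PySem.List.pyGetD grid (top + rows_done) []) left hi_w color
        = pvEff grid left hi_w color (top + 0 + (rows_done.toNat : Int))
      rw [show top + 0 + (rows_done.toNat : Int) = top + rows_done by omega]
      rfl
    show pvAdvance grid top left hi_w color
        (min cap (pvRunLen (PySem.List.pyGetD grid (top + rows_done) []) left hi_w color))
        (rows_done + 1) rh = _
    rw [pvAdvance_spec grid top left hi_w color _ (rows_done + 1) rh (by omega) hcap']
    rw [show max rh (rows_done + 1) = max rh rows_done by omega]
  · next hge =>
    rw [show max rh rows_done = rows_done by omega, hcap]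
termination_by cap rows_done rh => (rh - rows_done).toNat
decreasing_by omega

theorem pv_filter_le_pyRange (a b c : Int) (hcb : c ≤ b) :
    (PySem.List.pyRange a (b + 1) 1).filter (fun x => decide (x ≤ c))
      = PySem.List.pyRange a (c + 1) 1 := by
  by_cases hab : b + 1 ≤ a
  · rw [PySem.List.pyRange_one_eq_nil hab, PySem.List.pyRange_one_eq_nil (show c + 1 ≤ a by omega)]
    rfl
  · push_neg at hab
    rw [PySem.List.pyRange_one_cons (show a < b + 1 by omega), List.filter_cons]
    have hrec := pv_filter_le_pyRange (a + 1) b c hcb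
    by_cases hac : a ≤ c
    · rw [if_pos (by simpa using hac), hrec, PySem.List.pyRange_one_cons (show a < c + 1 by omega)]
    · rw [if_neg (by simpa using hac), hrec,
        PySem.List.pyRange_one_eq_nil (show c + 1 ≤ a + 1 by omega),
        PySem.List.pyRange_one_eq_nil (show c + 1 ≤ a by omega)]
termination_by (b + 1 - a).toNat
decreasing_by omega

-- the per-anchor, per-height width lists of A (filtered) and B (direct) coincide
theorem pv_inner_eq (grid : List (List Int)) (top left rh min_w hi_w color : Int) :
    (PySem.List.pyRange min_w (hi_w + 1) 1).filter (fun rw_ => pvOkRect grid color top left rh rw_)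
      = PySem.List.pyRange min_w
          ((if 1 ≤ rh then pvPrefCap grid top left hi_w color hi_w 0 rh.toNat else hi_w) + 1) 1 := by
  by_cases h1 : 1 ≤ rh
  · rw [if_pos h1]
    set c := pvPrefCap grid top left hi_w color hi_w 0 rh.toNat with hcval
    have hcle : c ≤ hi_w := by
      have := (le_pvPrefCap_iff grid top left hi_w color hi_w 0 rh.toNat c).mp (le_of_eq hcval)
      exact this.1
    have hfe : ∀ rw_ ∈ PySem.List.pyRange min_w (hi_w + 1) 1,
        pvOkRect grid color top left rh rw_ = decide (rw_ ≤ c) := by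
      intro rw_ hm
      rw [PySem.List.mem_pyRange_one] at hm
      have hrwhi : rw_ ≤ hi_w := by omega
      have hiff : pvOkRect grid color top left rh rw_ = true ↔ rw_ ≤ c := by
        rw [pvOkRect_iff grid color top left rh rw_ hi_w hrwhi, hcval, le_pvPrefCap_iff]
        constructor
        · intro hall
          refine ⟨hrwhi, fun j hj => ?_⟩
          have h2 := hall (j : Int) (by omega) (by omega)
          rwa [show top + (j : Int) = top + 0 + (j : Int) by ring] at h2
        · rintro ⟨-, hall⟩ k h0 hk
          have h2 := hall k.toNat (by omega)
          rwa [show top + 0 + ((k.toNat : Nat) : Int) = top + k by omega] at h2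
      cases hb : pvOkRect grid color top left rh rw_ with
      | true => exact (decide_eq_true (hiff.mp hb)).symm
      | false =>
        symm
        rw [decide_eq_false_iff_not]
        intro hle
        exact absurd (hiff.mpr hle) (by simp [hb])
    rw [List.filter_congr hfe, pv_filter_le_pyRange min_w hi_w c hcle]
  · rw [if_neg h1]
    have : ∀ rw_ ∈ PySem.List.pyRange min_w (hi_w + 1) 1,
        pvOkRect grid color top left rh rw_ = true := by
      intro rw_ _
      rw [pvOkRect, PySem.List.pyRange_one_eq_nil (by omega)]
      rfl
    rw [List.filter_eq_self.mpr this]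

-- the stateful rh loop of B computes exactly A's rh loop
theorem pv_rh_loop (grid : List (List Int)) (top left min_w hi_h hi_w color : Int) :
    ∀ (lo : Int) (acc : List (List (String × Int))) (cap rows_done : Int),
      0 ≤ rows_done → rows_done ≤ max lo 0 →
      cap = pvPrefCap grid top left hi_w color hi_w 0 rows_done.toNat →
      (PySem.List.pyRange lo (hi_h + 1) 1).foldl
          (fun rects rh =>
            (PySem.List.pyRange min_w (hi_w + 1) 1).foldl
              (fun rects rw =>
                if pvOkRect grid color top left rh rw then rects ++ [pvMkRect top left rh rw color]
                else rects) rects) acc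
        = ((PySem.List.pyRange lo (hi_h + 1) 1).foldl
            (fun (st : List (List (String × Int)) × Int × Int) rh =>
              let p := pvAdvance grid top left hi_w color st.2.1 st.2.2 rh
              ((PySem.List.pyRange min_w (p.1 + 1) 1).foldl
                  (fun rects rw => rects ++ [pvMkRect top left rh rw color]) st.1, p.1, p.2))
            (acc, cap, rows_done)).1 := by
  intro lo acc cap rows_done h0 hle hcap
  by_cases hlo : hi_h + 1 ≤ lo
  · rw [PySem.List.pyRange_one_eq_nil hlo]
    rfl
  · rw [PySem.List.pyRange_one_cons (by omega : lo < hi_h + 1), List.foldl_cons, List.foldl_cons]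
    have hadv := pvAdvance_spec grid top left hi_w color cap rows_done lo h0 hcap
    rw [PySem.List.foldl_append_if]
    rw [pv_inner_eq grid top left lo min_w hi_w color]
    have hmax : (if 1 ≤ lo then pvPrefCap grid top left hi_w color hi_w 0 lo.toNat else hi_w)
        = pvPrefCap grid top left hi_w color hi_w 0 (max lo rows_done).toNat := by
      by_cases h1 : 1 ≤ lo
      · rw [if_pos h1, show max lo rows_done = lo by omega]
      · rw [if_neg h1, show (max lo rows_done).toNat = 0 by omega]
        simp [pvPrefCap]
    rw [hmax]
    rw [pv_rh_loop grid top left min_w hi_h hi_w color (lo + 1) _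
      (pvPrefCap grid top left hi_w color hi_w 0 (max lo rows_done).toNat) (max lo rows_done)
      (by omega) (by omega) rfl]
    show _ = ((PySem.List.pyRange (lo + 1) (hi_h + 1) 1).foldl _
      ((PySem.List.pyRange min_w ((pvAdvance grid top left hi_w color cap rows_done lo).1 + 1) 1).foldl
          (fun rects rw => rects ++ [pvMkRect top left lo rw color]) acc,
        (pvAdvance grid top left hi_w color cap rows_done lo).1,
        (pvAdvance grid top left hi_w color cap rows_done lo).2)).1
    rw [hadv]
    congr 1
    rw [PySem.List.foldl_append_singleton_eq_map]
termination_by lo => (hi_h + 1 - lo).toNat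
decreasing_by omega

-- ===== VERDICT (by name: the statement is the Claim_ definition above) =====
-- ===== VERDICT (by name: the statement is the Claim_ definition above) =====
theorem find_uniform_rectangles_spec : Claim_equal_find_uniform_rectangles := by
  intro grid min_h min_w max_h max_w _hdom _hpre
  unfold Spec_find_uniform_rectangles find_uniform_rectangles find_uniform_rectangles_alt
  apply PySem.List.foldl_congr_mem
  intro rects top _
  apply PySem.List.foldl_congr_mem
  intro rects' left _
  exact pv_rh_loop grid top left min_w (min max_h ((grid.length : Int) - top))
    (min max_w ((if grid.isEmpty then 0 else ((grid.headD []).length : Int)) - left))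
    (pvCell grid top left) min_h rects' _ 0 le_rfl (by omega) (by simp [pvPrefCap])
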